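-- pv_equiv track=rewrite | github.com/DarkSness420/Copl-Lambda-Calc | assignment 2/assignment2.py | putInCorrectFormat
-- ===== SOURCE A (Python) =====
-- letters = ['a', 'b', 'c', 'd', 'e', 'f', 'g', 'h', 'i', 'j', 'k', 'l', 'm', 'n', 'o', 'p', 'q', 'r', 's', 't', 'u', 'v', 'w', 'x', 'y', 'z',
--            'A', 'B', 'C', 'D', 'E', 'F', 'G', 'H', 'I', 'J', 'K', 'L', 'M', 'N', 'O', 'P', 'Q', 'R', 'S', 'T', 'U', 'V', 'W', 'X', 'Y', 'Z']
--
-- def putInCorrectFormat(inpString):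
--     #Puts an expression in the correct space format
--     ourString = ''
--     lastNormalChar = ''
--     spaceLastChar = False
--     for char in inpString:
--         if(char in ' \n\t'):
--             #Check if currentcharacter is a space, enter or tab
--             spaceLastChar = True
--         elif(spaceLastChar ==  True and (lastNormalChar in letters or lastNormalChar.isdigit()) and char in letters):
--             #check if last normal character was a digit or number (thus a var)
--             #and if this character is also a variable if so, put a space
--             ourString += ' ' + char
--             spaceLastChar = False
--             lastNormalChar = char
--         else:
--             #Just add this character
--             spaceLastChar = False
--             ourString += char
--             lastNormalChar = char
--
--     return ourString
-- ===== SOURCE B (Python) =====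
-- letters = ['a', 'b', 'c', 'd', 'e', 'f', 'g', 'h', 'i', 'j', 'k', 'l', 'm', 'n', 'o', 'p', 'q', 'r', 's', 't', 'u', 'v', 'w', 'x', 'y', 'z',
--            'A', 'B', 'C', 'D', 'E', 'F', 'G', 'H', 'I', 'J', 'K', 'L', 'M', 'N', 'O', 'P', 'Q', 'R', 'S', 'T', 'U', 'V', 'W', 'X', 'Y', 'Z']
--
-- def putInCorrectFormat(inpString):
--     # Split the string into maximal runs of whitespace / non-whitespace,
--     # then emit non-whitespace runs verbatim and a whitespace run as one
--     # space iff it sits between a var-like char (letter/digit) and a letter.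
--     runs = []  # list of [is_ws, list-of-chars]
--     for c in inpString:
--         ws = c in ' \n\t'
--         if runs and runs[-1][0] == ws:
--             runs[-1][1].append(c)
--         else:
--             runs.append([ws, [c]])
--     parts = []
--     prev = ''
--     for j, (is_ws, chars) in enumerate(runs):
--         if is_ws:
--             if j + 1 < len(runs):
--                 nxt = runs[j + 1][1][0]
--                 if (prev in letters or prev.isdigit()) and nxt in letters:
--                     parts.append(' ')
--         else:
--             parts.append(''.join(chars))
--             prev = chars[-1]
--     return ''.join(parts)
-- ===== Notes on version B (the rewrite author's own statement) =====
-- stated objective: alternative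
-- what changed: B splits the input into maximal whitespace/non-whitespace runs first and then decides each whitespace run from its neighbouring runs, instead of A's single character-by-character state machine with spaceLastChar/lastNormalChar flags.
import Mathlib
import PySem

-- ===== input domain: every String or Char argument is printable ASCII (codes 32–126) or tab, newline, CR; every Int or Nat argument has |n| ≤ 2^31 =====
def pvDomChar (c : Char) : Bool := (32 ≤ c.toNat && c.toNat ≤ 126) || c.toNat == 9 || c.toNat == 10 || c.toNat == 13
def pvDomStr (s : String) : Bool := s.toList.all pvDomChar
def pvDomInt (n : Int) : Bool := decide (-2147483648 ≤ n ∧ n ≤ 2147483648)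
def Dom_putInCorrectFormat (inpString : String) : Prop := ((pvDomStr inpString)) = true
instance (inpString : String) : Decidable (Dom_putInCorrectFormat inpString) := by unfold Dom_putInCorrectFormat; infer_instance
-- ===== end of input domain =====

-- B re-decomposes A's one-pass state machine into run-splitting plus a neighbour rule; same values, similar cost (objective: alternative).

-- ===== PORT A =====
def pvLetters : List Char :=
  ['a','b','c','d','e','f','g','h','i','j','k','l','m','n','o','p','q','r','s','t','u','v','w','x','y','z',
   'A','B','C','D','E','F','G','H','I','J','K','L','M','N','O','P','Q','R','S','T','U','V','W','X','Y','Z']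

def pvIsWs (c : Char) : Bool := c == ' ' || c == '\n' || c == '\t'

-- Python's lastNormalChar is '' or a one-char string; Option Char is exact ('' is neither in letters nor a digit).
def pvQual (o : Option Char) : Bool :=
  match o with
  | some c => pvLetters.contains c || PySem.Chars.isdigit c
  | none => false

def pvStepA (st : List Char × Option Char × Bool) (ch : Char) : List Char × Option Char × Bool :=
  let (out, last, sp) := st
  if pvIsWs ch then (out, last, true)
  else if sp && pvQual last && pvLetters.contains ch then (out ++ [' ', ch], some ch, false)
  else (out ++ [ch], some ch, false)

def putInCorrectFormat (inpString : String) : String :=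
  String.mk ((inpString.toList.foldl pvStepA ([], none, false)).1)

-- ===== PORT B =====
-- runs[-1] mutation in Source B becomes: replace the last element of the runs list.
def pvAddRun (runs : List (Bool × List Char)) (c : Char) : List (Bool × List Char) :=
  let ws := pvIsWs c
  match runs.getLast? with
  | some (k, r) => if k == ws then runs.dropLast ++ [(k, r ++ [c])] else runs ++ [(ws, [c])]
  | none => [(ws, [c])]

-- Source B's enumerate loop: structural recursion on the remaining runs, j the current index,
-- runs[j+1] looked up in the full list. Runs never carry an empty char list, so head?/getLast? are exact.
def pvGo2 (runs : List (Bool × List Char)) : Nat → Option Char → List (Bool × List Char) → List Char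
  | _, _, [] => []
  | j, prev, (isws, chars) :: rest =>
    if isws then
      (if j + 1 < runs.length then
        match runs[j+1]? with
        | some (_, r') =>
          match r'.head? with
          | some nxt => if pvQual prev && pvLetters.contains nxt then [' '] else []
          | none => []
        | none => []
      else []) ++ pvGo2 runs (j+1) prev rest
    else
      chars ++ pvGo2 runs (j+1) (match chars.getLast? with | some l => some l | none => prev) rest

def putInCorrectFormat_alt (inpString : String) : String :=
  let runs := inpString.toList.foldl pvAddRun []
  String.mk (pvGo2 runs 0 none runs)

-- ===== PRECONDITION & SPEC =====
def Spec_putInCorrectFormat (inpString : String) (out : String) : Prop := out = putInCorrectFormat_alt inpString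
instance (inpString : String) (out : String) : Decidable (Spec_putInCorrectFormat inpString out) := by unfold Spec_putInCorrectFormat; infer_instance

-- ===== CLAIM (what is proved, stated in full; the proofs are below) =====
def Claim_equal_putInCorrectFormat : Prop := ∀ (inpString : String), Dom_putInCorrectFormat inpString → Spec_putInCorrectFormat inpString (putInCorrectFormat inpString)

-- ===== LEMMAS AND PROOFS =====

-- Reference form of A: the characters A appends, by recursion on the input.
def pvCore : Option Char → Bool → List Char → List Char
  | _, _, [] => []
  | last, sp, c :: rest =>
    if pvIsWs c then pvCore last true rest
    else if sp && pvQual last && pvLetters.contains c then ' ' :: c :: pvCore (some c) false rest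
    else c :: pvCore (some c) false rest

theorem foldlA_eq_core (cs : List Char) : ∀ (out : List Char) (last : Option Char) (sp : Bool),
    (cs.foldl pvStepA (out, last, sp)).1 = out ++ pvCore last sp cs := by
  induction cs with
  | nil => intro out last sp; simp [pvCore]
  | cons c cs ih =>
    intro out last sp
    simp only [List.foldl_cons, pvStepA, pvCore]
    by_cases hw : pvIsWs c = true
    · simp [hw, ih]
    · simp only [Bool.not_eq_true] at hw
      simp only [hw, Bool.false_eq_true, if_false]
      split <;> simp [ih]

-- Front-recursive form of the run splitter.
def pvCons' (k : Bool) (c : Char) : List (Bool × List Char) → List (Bool × List Char)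
  | [] => [(k, [c])]
  | (k', r) :: t => if k = k' then (k, c :: r) :: t else (k, [c]) :: (k', r) :: t

def pvGroup : List Char → List (Bool × List Char)
  | [] => []
  | c :: cs => pvCons' (pvIsWs c) c (pvGroup cs)

def pvGlue (k : Bool) (r : List Char) : List (Bool × List Char) → List (Bool × List Char)
  | [] => [(k, r)]
  | (k', r') :: t => if k = k' then (k, r ++ r') :: t else (k, r) :: (k', r') :: t

theorem cons'_eq_glue (k : Bool) (c : Char) (g : List (Bool × List Char)) :
    pvCons' k c g = pvGlue k [c] g := by
  cases g with
  | nil => rfl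
  | cons p t => rcases p with ⟨k', r⟩; by_cases h : k = k' <;> simp [pvCons', pvGlue, h]

theorem glue_glue (k : Bool) (r : List Char) (c : Char) (g : List (Bool × List Char)) :
    pvGlue k r (pvGlue k [c] g) = pvGlue k (r ++ [c]) g := by
  cases g with
  | nil => simp [pvGlue]
  | cons p t =>
    rcases p with ⟨k', r'⟩
    by_cases h : k = k' <;> simp [pvGlue, h]

theorem glue_glue_ne (k k' : Bool) (r : List Char) (c : Char) (g : List (Bool × List Char))
    (h : k ≠ k') : pvGlue k r (pvGlue k' [c] g) = (k, r) :: pvGlue k' [c] g := by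
  cases g with
  | nil => simp [pvGlue, h]
  | cons p t =>
    rcases p with ⟨k'', r''⟩
    by_cases h2 : k' = k''
    · subst h2; simp [pvGlue, h]
    · simp [pvGlue, h2, h]

theorem foldl_addRun_append (cs : List Char) : ∀ (pre : List (Bool × List Char)) (k : Bool) (r : List Char),
    List.foldl pvAddRun (pre ++ [(k, r)]) cs = pre ++ pvGlue k r (pvGroup cs) := by
  induction cs with
  | nil => intro pre k r; simp [pvGroup, pvGlue]
  | cons c cs ih =>
    intro pre k r
    have hlast : (pre ++ [(k, r)]).getLast? = some (k, r) := by simp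
    have hdl : (pre ++ [(k, r)]).dropLast = pre := by simp
    simp only [List.foldl_cons, pvAddRun, hlast, pvGroup, cons'_eq_glue]
    by_cases h : k = pvIsWs c
    · simp only [← h, beq_self_eq_true, if_true, hdl, ih, glue_glue]
    · have hne : (k == pvIsWs c) = false := by simp [h]
      simp only [hne, Bool.false_eq_true, if_false]
      rw [show pre ++ [(k, r)] ++ [(pvIsWs c, [c])] = (pre ++ [(k, r)]) ++ [(pvIsWs c, [c])] by simp,
        ih, glue_glue_ne _ _ _ _ _ h]
      simp

theorem foldl_addRun_eq_group (cs : List Char) : List.foldl pvAddRun [] cs = pvGroup cs := by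
  cases cs with
  | nil => rfl
  | cons c cs =>
    simp only [List.foldl_cons, pvAddRun, List.getLast?_nil, pvGroup]
    rw [show [(pvIsWs c, [c])] = ([] : List (Bool × List Char)) ++ [(pvIsWs c, [c])] from rfl,
      foldl_addRun_append, cons'_eq_glue]
    simp

-- Neighbour-passing form of Source B's second loop.
def pvP : Option Char → List (Bool × List Char) → List Char
  | _, [] => []
  | prev, (isws, r) :: t =>
    if isws then
      (match t with
       | [] => []
       | (_, r') :: _ =>
         match r'.head? with
         | some nxt => if pvQual prev && pvLetters.contains nxt then [' '] else []
         | none => []) ++ pvP prev t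
    else r ++ pvP (match r.getLast? with | some l => some l | none => prev) t

theorem go2_eq_P (runs : List (Bool × List Char)) : ∀ (t : List (Bool × List Char)) (j : Nat) (prev : Option Char),
    runs.drop j = t → pvGo2 runs j prev t = pvP prev t := by
  intro t
  induction t with
  | nil => intro j prev _; rfl
  | cons p t ih =>
    intro j prev hdrop
    rcases p with ⟨isws, r⟩
    have hdrop1 : runs.drop (j+1) = t := by
      rw [← List.drop_drop, hdrop]; rfl
    have hget : runs[j+1]? = t.head? := by
      rw [← List.head?_drop, hdrop1]
    have hlt : j + 1 < runs.length ↔ t ≠ [] := by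
      constructor
      · intro h hnil
        have : runs.drop (j+1) ≠ [] := by
          simp [List.drop_eq_nil_iff]; omega
        exact this (hdrop1.trans hnil)
      · intro h
        by_contra hge
        have : runs.drop (j+1) = [] := List.drop_eq_nil_iff.mpr (by omega)
        exact h (hdrop1.symm.trans this)
    simp only [pvGo2, pvP]
    by_cases hws : isws = true
    · subst hws
      simp only [if_true]
      cases t with
      | nil => simp [ih _ prev hdrop1, hlt]
      | cons q t' =>
        have hl : j + 1 < runs.length := hlt.mpr (by simp)
        rcases q with ⟨k', r'⟩
        simp only [hl, if_true, hget, List.head?_cons, ih _ prev hdrop1]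
    · simp only [Bool.not_eq_true] at hws
      simp [hws, ih _ _ hdrop1]

-- pvP on grouped runs computes pvCore (both flag states at once).
theorem P_group_core (cs : List Char) :
    (∀ prev, pvP prev (pvGroup cs) = pvCore prev false cs) ∧
    (∀ prev c0, pvP prev (pvCons' true c0 (pvGroup cs)) = pvCore prev true cs) := by
  induction cs with
  | nil =>
    constructor
    · intro prev; rfl
    · intro prev c0; simp [pvGroup, pvCons', pvP, pvCore]
  | cons c cs ih =>
    obtain ⟨ih1, ih2⟩ := ih
    have h1 : ∀ prev, pvP prev (pvGroup (c :: cs)) = pvCore prev false (c :: cs) := by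
      intro prev
      simp only [pvGroup, pvCore]
      by_cases hw : pvIsWs c = true
      · simp only [hw, if_true]
        exact ih2 prev c
      · simp only [Bool.not_eq_true] at hw
        rw [hw]
        simp only [Bool.false_eq_true, if_false, Bool.false_and]
        cases hg : pvGroup cs with
        | nil =>
          have := ih1 (some c); rw [hg] at this
          simp [pvCons', pvP, ← this, pvP]
        | cons p t =>
          rcases p with ⟨k', r⟩
          have := ih1 (some c); rw [hg] at this
          by_cases hk : k' = true
          · subst hk
            simp only [pvCons', Bool.false_eq_true, if_false, pvP, List.getLast?_singleton]
            rw [← this]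
            simp [pvP]
          · simp only [Bool.not_eq_true] at hk; subst hk
            simp only [pvCons', if_true, pvP, Bool.false_eq_true, if_false]
            rw [← this]
            simp only [pvP, Bool.false_eq_true, if_false]
            cases r with
            | nil => simp
            | cons a r' => simp [List.getLast?_cons]
    refine ⟨h1, ?_⟩
    have hex : ∀ (g : List (Bool × List Char)) (c0 : Char),
        ∃ r1 t1, pvCons' true c0 g = (true, r1) :: t1 := by
      intro g c0
      cases g with
      | nil => exact ⟨[c0], [], rfl⟩
      | cons p t =>
        rcases p with ⟨k', r⟩
        by_cases hk : (true : Bool) = k'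
        · exact ⟨c0 :: r, t, by simp [pvCons', hk]⟩
        · exact ⟨[c0], (k', r) :: t, by simp [pvCons', hk]⟩
    intro prev c0
    by_cases hw : pvIsWs c = true
    · -- group (c::cs) is ws-headed; prepending c0 merges, and pvP ignores the run content
      have hcore : pvCore prev true (c :: cs) = pvCore prev true cs := by
        simp [pvCore, hw]
      obtain ⟨rr, tt, hg⟩ := hex (pvGroup cs) c
      have hgg : pvGroup (c :: cs) = (true, rr) :: tt := by simp [pvGroup, hw, hg]
      rw [hgg, hcore, ← ih2 prev c, hg]
      simp [pvCons', pvP]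
    · -- group (c::cs) starts with a non-ws run whose first char is c
      simp only [Bool.not_eq_true] at hw
      have hhead : ∃ r1 t1, pvGroup (c :: cs) = (false, c :: r1) :: t1 := by
        simp only [pvGroup, hw]
        cases h : pvGroup cs with
        | nil => exact ⟨[], [], by simp [pvCons']⟩
        | cons p t' =>
          rcases p with ⟨k', r⟩
          by_cases hk : (false : Bool) = k'
          · exact ⟨r, t', by simp [pvCons', hk]⟩
          · exact ⟨[], (k', r) :: t', by simp [pvCons', hk]⟩
      obtain ⟨r1, t1, hg⟩ := hhead
      have hP1 := h1 prev
      rw [hg] at hP1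
      have hcore2 : pvCore prev false (c :: cs) = c :: pvCore (some c) false cs := by
        simp [pvCore, hw]
      rw [hcore2] at hP1
      have hstep : pvCons' true c0 ((false, c :: r1) :: t1) =
          (true, [c0]) :: (false, c :: r1) :: t1 := by simp [pvCons']
      rw [hg, hstep]
      rw [show pvP prev ((true, [c0]) :: (false, c :: r1) :: t1) =
          (if pvQual prev && pvLetters.contains c then [' '] else []) ++
            pvP prev ((false, c :: r1) :: t1) by simp [pvP]]
      rw [hP1]
      simp only [pvCore, hw, Bool.false_eq_true, if_false]
      cases hq : (pvQual prev && pvLetters.contains c) <;>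
        simp only [Bool.and_eq_true, List.contains_eq_mem, decide_eq_true_eq,
          ← Bool.not_eq_true, Bool.and_eq_true] at hq <;> simp [hq]

-- ===== VERDICT (by name: the statement is the Claim_ definition above) =====
theorem putInCorrectFormat_spec : Claim_equal_putInCorrectFormat := by
  intro s _
  show putInCorrectFormat s = putInCorrectFormat_alt s
  have hA : putInCorrectFormat s = String.mk (pvCore none false s.toList) := by
    unfold putInCorrectFormat
    rw [foldlA_eq_core]
    rfl
  have hB : putInCorrectFormat_alt s =
      String.mk (pvGo2 (pvGroup s.toList) 0 none (pvGroup s.toList)) := by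
    show String.mk (pvGo2 (s.toList.foldl pvAddRun []) 0 none (s.toList.foldl pvAddRun [])) = _
    rw [foldl_addRun_eq_group]
  rw [hA, hB, go2_eq_P _ _ 0 none (by simp), (P_group_core s.toList).1]
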